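-- pv_equiv track=rewrite | github.com/alexwhz-sjtu/dflash_eval | train/data/dataset.py | _validate_indices
-- ===== SOURCE A (Python) =====
-- from typing import List, Optional, Dict, Any
--
-- def _validate_indices(indices: List[int], dataset_size: int, expected_count: int) -> bool:
--     if not isinstance(indices, list):
--         return False
--     if len(indices) != expected_count:
--         return False
--     if expected_count == 0:
--         return True
--     if not all(isinstance(x, int) for x in indices):
--         return False
--     if min(indices) < 0 or max(indices) >= dataset_size:
--         return False
--     return True
-- ===== SOURCE B (Python) =====
-- def _validate_indices(indices, dataset_size, expected_count):
--     if not isinstance(indices, list) or len(indices) != expected_count: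
--         return False
--     if not all(isinstance(x, int) for x in indices):
--         return False
--     s = sorted(indices)
--     return not s or (s[0] >= 0 and s[-1] < dataset_size)
-- ===== Notes on version B (the rewrite author's own statement) =====
-- stated objective: alternative
-- what changed: Replaces A's min()/max() scans and the expected_count==0 short-circuit by sorting the list once and inspecting only the two endpoints s[0] and s[-1] of the sorted order (empty sorted list means vacuously valid).
import Mathlib
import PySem

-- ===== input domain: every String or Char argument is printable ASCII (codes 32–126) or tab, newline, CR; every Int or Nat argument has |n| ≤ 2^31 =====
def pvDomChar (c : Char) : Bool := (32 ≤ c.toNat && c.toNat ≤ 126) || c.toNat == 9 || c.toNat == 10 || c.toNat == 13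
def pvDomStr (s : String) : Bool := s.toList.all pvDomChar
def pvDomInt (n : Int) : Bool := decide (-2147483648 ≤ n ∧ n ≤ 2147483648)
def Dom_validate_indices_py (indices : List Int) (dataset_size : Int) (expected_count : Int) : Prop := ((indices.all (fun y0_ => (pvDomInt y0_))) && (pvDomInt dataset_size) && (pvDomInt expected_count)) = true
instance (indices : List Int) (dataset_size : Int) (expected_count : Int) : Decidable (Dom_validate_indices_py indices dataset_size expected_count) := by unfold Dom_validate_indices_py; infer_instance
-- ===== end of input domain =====

-- B validates bounds by sorting once and inspecting only the endpoints s[0]/s[-1] of the sorted order, instead of A's min()/max() scans and expected_count==0 short-circuit (objective: alternative, same practical cost).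


-- ===== PORT A =====
-- Port of A. isinstance(indices, list) and isinstance(x, int) are always True under the type
-- convention (List Int), ported as the trivially-true checks A performs.
def validate_indices_py (indices : List Int) (dataset_size : Int) (expected_count : Int) : Bool :=
  if (indices.length : Int) ≠ expected_count then false
  else if expected_count = 0 then true
  else if ¬ (indices.all (fun _ => true)) then false
  else match PySem.List.min? indices (fun x => x), PySem.List.max? indices (fun x => x) with
    | some mn, some mx => if mn < 0 || mx ≥ dataset_size then false else true
    | _, _ => true

-- ===== PORT B =====
-- Port of B: sort once, then look only at s[0] and s[-1] ('not s or …' ported as the match on the sorted list).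
def validate_indices_py_alt (indices : List Int) (dataset_size : Int) (expected_count : Int) : Bool :=
  if (indices.length : Int) ≠ expected_count then false
  else if ¬ (indices.all (fun _ => true)) then false
  else match PySem.List.sorted indices (fun x => x) false with
    | [] => true
    | m :: t => decide (0 ≤ m) && decide (t.getLastD m < dataset_size)

-- ===== PRECONDITION & SPEC =====
def Spec_validate_indices_py (indices : List Int) (dataset_size : Int) (expected_count : Int) (out : Bool) : Prop := out = validate_indices_py_alt indices dataset_size expected_count
instance (indices : List Int) (dataset_size : Int) (expected_count : Int) (out : Bool) : Decidable (Spec_validate_indices_py indices dataset_size expected_count out) := by unfold Spec_validate_indices_py; infer_instance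

-- ===== CLAIM (what is proved, stated in full; the proofs are below) =====
def Claim_equal_validate_indices_py : Prop := ∀ (indices : List Int) (dataset_size : Int) (expected_count : Int), Dom_validate_indices_py indices dataset_size expected_count → Spec_validate_indices_py indices dataset_size expected_count (validate_indices_py indices dataset_size expected_count)

-- ===== LEMMAS AND PROOFS =====

-- foldl min / foldl max are the minimum / maximum of x :: t
lemma pv_foldl_min_isMin (t : List Int) (x : Int) :
    t.foldl min x ∈ x :: t ∧ ∀ y ∈ x :: t, t.foldl min x ≤ y := by
  induction t generalizing x with
  | nil => simp
  | cons a t ih =>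
    obtain ⟨hm, hle⟩ := ih (min x a)
    refine ⟨?_, ?_⟩
    · simp only [List.foldl_cons]
      rcases List.mem_cons.mp hm with h | h
      · rcases min_choice x a with hc | hc
        · rw [h, hc]; exact List.mem_cons_self
        · rw [h, hc]; exact List.mem_cons_of_mem _ List.mem_cons_self
      · exact List.mem_cons_of_mem _ (List.mem_cons_of_mem _ h)
    · intro y hy
      simp only [List.mem_cons] at hy
      simp only [List.foldl_cons]
      rcases hy with rfl | rfl | hy
      · exact le_trans (hle _ List.mem_cons_self) (min_le_left _ _)
      · exact le_trans (hle _ List.mem_cons_self) (min_le_right _ _)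
      · exact hle _ (List.mem_cons_of_mem _ hy)

lemma pv_foldl_max_isMax (t : List Int) (x : Int) :
    t.foldl max x ∈ x :: t ∧ ∀ y ∈ x :: t, y ≤ t.foldl max x := by
  induction t generalizing x with
  | nil => simp
  | cons a t ih =>
    obtain ⟨hm, hle⟩ := ih (max x a)
    refine ⟨?_, ?_⟩
    · simp only [List.foldl_cons]
      rcases List.mem_cons.mp hm with h | h
      · rcases max_choice x a with hc | hc
        · rw [h, hc]; exact List.mem_cons_self
        · rw [h, hc]; exact List.mem_cons_of_mem _ List.mem_cons_self
      · exact List.mem_cons_of_mem _ (List.mem_cons_of_mem _ h)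
    · intro y hy
      simp only [List.mem_cons] at hy
      simp only [List.foldl_cons]
      rcases hy with rfl | rfl | hy
      · exact le_trans (le_max_left _ _) (hle _ List.mem_cons_self)
      · exact le_trans (le_max_right _ _) (hle _ List.mem_cons_self)
      · exact hle _ (List.mem_cons_of_mem _ hy)

lemma pv_getLastD_cons (a d : Int) (l : List Int) : (a :: l).getLastD d = l.getLastD a := by
  cases l <;> simp [List.getLastD]

-- in a ≤-sorted list every element is ≤ the last one
lemma pv_pairwise_le_getLastD (l : List Int) (d : Int) (h : l.Pairwise (· ≤ ·)) :
    ∀ y ∈ l, y ≤ l.getLastD d := by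
  induction l generalizing d with
  | nil => simp
  | cons a t ih =>
    intro y hy
    rw [pv_getLastD_cons]
    rcases t with _ | ⟨b, u⟩
    · simp at hy; simp [hy, List.getLastD]
    · rcases List.mem_cons.mp hy with hya | hy2
      · have hb := (List.pairwise_cons.mp h).1 b List.mem_cons_self
        have hlast := ih a (List.pairwise_cons.mp h).2 b List.mem_cons_self
        rw [hya]
        omega
      · exact ih a (List.pairwise_cons.mp h).2 y hy2

theorem validate_indices_py_spec : Claim_equal_validate_indices_py := by
  intro indices ds ec _
  unfold Spec_validate_indices_py validate_indices_py validate_indices_py_alt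
  by_cases hlen : (indices.length : Int) = ec
  · simp only [hlen, ne_eq, not_true_eq_false, if_false]
    by_cases hec : ec = 0
    · have hnil : indices = [] := by
        cases indices with
        | nil => rfl
        | cons a t => exfalso; rw [hec] at hlen; simp at hlen; omega
      simp [hec, hnil, PySem.List.sorted]
    · rw [if_neg hec]
      cases indices with
      | nil => exfalso; apply hec; simp at hlen; omega
      | cons x t =>
        rw [if_neg (by simp), if_neg (by simp)]
        rw [PySem.List.min?_id_cons, PySem.List.max?_id_cons]
        have hnil : PySem.List.sorted (x :: t) (fun x => x) false ≠ [] := by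
          simp [PySem.List.sorted_eq_nil_iff]
        obtain ⟨m, s, hs⟩ := List.exists_cons_of_ne_nil hnil
        rw [hs]
        -- m = minimum, (m::s).getLast = maximum
        have hperm : (m :: s).Perm (x :: t) := hs ▸ PySem.List.sorted_perm (x :: t) (fun x => x) false
        have hmem_iff : ∀ y, y ∈ m :: s ↔ y ∈ x :: t := fun y => hperm.mem_iff
        have hmin := pv_foldl_min_isMin t x
        have hmax := pv_foldl_max_isMax t x
        have hm_le : ∀ y ∈ x :: t, m ≤ y := PySem.List.key_head_sorted_le (x :: t) (fun x => x) hs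
        have hm_mem : m ∈ x :: t := (hmem_iff m).mp (by simp)
        have hmin_eq : t.foldl min x = m :=
          le_antisymm (hmin.2 m hm_mem) (hm_le _ hmin.1)
        have hpw : (m :: s).Pairwise (· ≤ ·) := by
          have := PySem.List.sorted_pairwise (xs := x :: t) (key := fun x => x) (κ := Int)
          rw [hs] at this; exact this
        have hlast_le : ∀ y ∈ x :: t, y ≤ s.getLastD m := by
          intro y hy
          have := pv_pairwise_le_getLastD (m :: s) m hpw y ((hmem_iff y).mpr hy)
          rwa [pv_getLastD_cons] at this
        have hlast_mem : s.getLastD m ∈ x :: t := by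
          apply (hmem_iff _).mp
          have h0 : (m :: s).getLastD m ∈ m :: s := List.mem_of_getLast? rfl
          rwa [pv_getLastD_cons] at h0
        have hmax_eq : t.foldl max x = s.getLastD m :=
          le_antisymm (hlast_le _ hmax.1) (hmax.2 _ hlast_mem)
        rw [hmin_eq, hmax_eq]
        show (if (decide (m < 0) || decide (s.getLastD m ≥ ds)) = true then false else true)
            = (decide (0 ≤ m) && decide (s.getLastD m < ds))
        rcases lt_or_ge m 0 with h1 | h1
        · rw [if_pos (by rw [decide_eq_true h1, Bool.true_or])]
          rw [decide_eq_false (by omega : ¬ (0:Int) ≤ m), Bool.false_and]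
        · rcases le_or_gt ds (s.getLastD m) with h2 | h2
          · rw [if_pos (by rw [decide_eq_true (by omega : s.getLastD m ≥ ds), Bool.or_true])]
            rw [decide_eq_false (by omega : ¬ s.getLastD m < ds), Bool.and_false]
          · rw [if_neg (by rw [decide_eq_false (by omega : ¬ m < 0),
              decide_eq_false (by omega : ¬ s.getLastD m ≥ ds)]; simp)]
            rw [decide_eq_true h1, decide_eq_true (by omega : s.getLastD m < ds), Bool.and_self]
  · simp [hlen]
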